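-- pv_equiv track=rewrite | github.com/NKalavros/scMEDALTpy | ComputeDistance_numpy.py | distcalc_original
-- ===== SOURCE A (Python) =====
-- import copy
--
-- def distcalc_original(node1, node2):
--     assert len(node1) == len(node2)
--     if len(node1) == 1:
--         return abs(node1[0] - node2[0])
--     else:
--         d = 0
--         newlist = copy.deepcopy(node1)
--         for i in range(0, len(node2)):
--             newlist[i] -= node2[i]
--         while newlist:
--             if newlist[0] == 0:
--                 newlist.pop(0)
--             elif newlist[0] > 0:
--                 k = 0
--                 for i in range(0, len(newlist)):
--                     if newlist[i] > 0:
--                         k = i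
--                     else:
--                         break
--                 for i in range(0, k + 1):
--                     newlist[i] -= 1
--                 d += 1
--             elif newlist[0] < 0:
--                 k = 0
--                 for i in range(0, len(newlist)):
--                     if newlist[i] < 0:
--                         k = i
--                     else:
--                         break
--                 for i in range(0, k + 1):
--                     newlist[i] += 1
--                 d += 1
--         return abs(d)
-- ===== SOURCE B (Python) =====
-- def distcalc_original(node1, node2):
--     assert len(node1) == len(node2)
--     total = 0
--     prev = 0
--     for a, b in zip(node1, node2):
--         cur = a - b
--         total += abs(cur - prev)
--         prev = cur
--     total += abs(prev)
--     return total // 2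
-- ===== Notes on version B (the rewrite author's own statement) =====
-- stated objective: faster
-- what changed: Replaced A's while-loop that repeatedly decrements/increments the leading same-sign run of the difference array (one unit per iteration) by a single pass computing half of the zero-padded sum of absolute consecutive differences of node1-node2.
import Mathlib
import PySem

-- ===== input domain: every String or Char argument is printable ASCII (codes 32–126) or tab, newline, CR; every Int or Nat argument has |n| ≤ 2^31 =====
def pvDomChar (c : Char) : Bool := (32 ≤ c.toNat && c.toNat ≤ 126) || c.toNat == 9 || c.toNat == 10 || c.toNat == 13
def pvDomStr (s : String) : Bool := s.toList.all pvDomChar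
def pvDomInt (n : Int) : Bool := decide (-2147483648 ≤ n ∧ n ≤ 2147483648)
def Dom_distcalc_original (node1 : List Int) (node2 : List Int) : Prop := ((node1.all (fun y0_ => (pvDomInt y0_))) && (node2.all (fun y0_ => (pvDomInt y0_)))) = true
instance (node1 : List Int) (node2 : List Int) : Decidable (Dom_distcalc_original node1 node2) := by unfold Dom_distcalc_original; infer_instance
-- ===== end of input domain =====

-- B replaces A's value-by-value run-cancelling while-loop (O(n·S), S = Σ|diff|) by a single
-- pass computing half the zero-padded sum of absolute consecutive differences (O(n)); faster.

-- ===== PORT A =====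
-- `for i in range(0, len(newlist)): if cond: k = i else: break`  (i = index, k = last good index)
def pvFindK : List Int → Nat → Nat → (Int → Bool) → Nat
  | [], _, k, _ => k
  | x :: xs, i, k, p => if p x then pvFindK xs (i+1) i p else k

-- `for i in range(0, n): newlist[i] += δ`
def pvSubFirst : List Int → Nat → Int → List Int
  | l, 0, _ => l
  | [], _+1, _ => []
  | x :: xs, n+1, δ => (x + δ) :: pvSubFirst xs n δ

-- every loop iteration strictly decreases this, so it is a sufficient fuel bound
def pvMeasure (l : List Int) : Nat := (l.map Int.natAbs).sum + l.length

-- the while-loop of A; d is the accumulator; fuel only makes the recursion structural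
-- (pvLoop_go below proves fuel = pvMeasure l is enough, so the out-of-fuel arm is never taken)
def pvLoop : Nat → List Int → Int → Int
  | _, [], d => d
  | 0, _ :: _, d => d
  | fuel+1, x :: xs, d =>
    if x = 0 then pvLoop fuel xs d
    else if x > 0 then
      pvLoop fuel (pvSubFirst (x :: xs) (pvFindK (x :: xs) 0 0 (fun a => decide (a > 0)) + 1) (-1)) (d+1)
    else
      pvLoop fuel (pvSubFirst (x :: xs) (pvFindK (x :: xs) 0 0 (fun a => decide (a < 0)) + 1) 1) (d+1)

def distcalc_original (node1 : List Int) (node2 : List Int) : Int :=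
  if node1.length = 1 then
    -- node1[0]/node2[0]; under Pre_ both lists have length 1, so headD 0 is exact
    |node1.headD 0 - node2.headD 0|
  else
    -- newlist = node1 (deep copy); newlist[i] -= node2[i] for all i (equal lengths under Pre_)
    |pvLoop (pvMeasure (List.zipWith (· - ·) node1 node2)) (List.zipWith (· - ·) node1 node2) 0|

-- ===== PORT B =====
def distcalc_original_alt (node1 : List Int) (node2 : List Int) : Int :=
  PySem.Int.floordiv
    (((List.zip node1 node2).foldl
        (fun (s : Int × Int) ab => (s.1 + |ab.1 - ab.2 - s.2|, ab.1 - ab.2)) (0, 0)).1 +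
      |((List.zip node1 node2).foldl
        (fun (s : Int × Int) ab => (s.1 + |ab.1 - ab.2 - s.2|, ab.1 - ab.2)) (0, 0)).2|) 2

-- ===== PRECONDITION & SPEC =====
-- A's `assert len(node1) == len(node2)` raises AssertionError on unequal lengths; that is all Pre_ excludes.
def Pre_distcalc_original (node1 : List Int) (node2 : List Int) : Prop := node1.length = node2.length
instance (node1 : List Int) (node2 : List Int) : Decidable (Pre_distcalc_original node1 node2) := by
  unfold Pre_distcalc_original; infer_instance

def pvWitness_distcalc_original : List Int × List Int := ([3, -1, 2], [0, 1, 1])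

def Spec_distcalc_original (node1 : List Int) (node2 : List Int) (out : Int) : Prop := out = distcalc_original_alt node1 node2
instance (node1 : List Int) (node2 : List Int) (out : Int) : Decidable (Spec_distcalc_original node1 node2 out) := by unfold Spec_distcalc_original; infer_instance

-- ===== CLAIM (what is proved, stated in full; the proofs are below) =====
def Claim_equal_distcalc_original : Prop := ∀ (node1 : List Int) (node2 : List Int), Dom_distcalc_original node1 node2 → Pre_distcalc_original node1 node2 → Spec_distcalc_original node1 node2 (distcalc_original node1 node2)

-- ===== LEMMAS AND PROOFS =====

theorem pvFindK_spec (p : Int → Bool) : ∀ (xs : List Int) (x : Int) (i k : Nat), p x = true →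
    pvFindK (x :: xs) i k p + 1 = i + ((x :: xs).takeWhile p).length := by
  intro xs
  induction xs with
  | nil => intro x i k hx; simp [pvFindK, hx, List.takeWhile]
  | cons y ys ih =>
    intro x i k hx
    by_cases hy : p y = true
    · have := ih y (i+1) i hy
      simp only [pvFindK, hx, if_true, List.takeWhile, hy, List.length_cons] at *
      omega
    · simp [pvFindK, hx, List.takeWhile, hy]

theorem pvSubFirst_tw : ∀ (l : List Int) (p : Int → Bool) (δ : Int),
    pvSubFirst l ((l.takeWhile p).length) δ = (l.takeWhile p).map (· + δ) ++ l.dropWhile p := by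
  intro l
  induction l with
  | nil => intro p δ; simp [pvSubFirst]
  | cons x xs ih =>
    intro p δ
    by_cases hx : p x = true
    · simp only [List.takeWhile, List.dropWhile, hx, List.length_cons, List.map_cons,
        List.cons_append, pvSubFirst]
      rw [ih]
    · simp [List.takeWhile, List.dropWhile, Bool.eq_false_iff.mpr hx, pvSubFirst]

theorem pvSum_natAbs_le (δ : Int) : ∀ (t : List Int), (∀ x ∈ t, (x + δ).natAbs ≤ x.natAbs) →
    ((t.map (· + δ)).map Int.natAbs).sum ≤ (t.map Int.natAbs).sum := by
  intro t
  induction t with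
  | nil => simp
  | cons x xs ih =>
    intro h
    simp only [List.map_cons, List.sum_cons]
    have h1 := h x (by simp)
    have h2 := ih (fun y hy => h y (by simp [hy]))
    omega

theorem pvMeasure_shift (δ : Int) (t d : List Int) (hne : t ≠ [])
    (h : ∀ x ∈ t, (x + δ).natAbs < x.natAbs) :
    pvMeasure (t.map (· + δ) ++ d) < pvMeasure (t ++ d) := by
  cases t with
  | nil => exact absurd rfl hne
  | cons x xs =>
    have h1 := h x (by simp)
    have h2 := pvSum_natAbs_le δ xs (fun y hy => Nat.le_of_lt (h y (by simp [hy])))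
    simp only [pvMeasure, List.map_cons, List.map_append, List.sum_append, List.sum_cons,
      List.length_append, List.length_map, List.length_cons]
    omega

theorem pvTakeWhile_pos (p : Int → Bool) : ∀ (l : List Int), ∀ x ∈ l.takeWhile p, p x = true := by
  intro l
  induction l with
  | nil => simp
  | cons y ys ih =>
    by_cases hy : p y = true
    · intro x hx
      simp only [List.takeWhile, hy] at hx
      rcases List.mem_cons.mp hx with h | h
      · subst h; exact hy
      · exact ih x h
    · intro x hx; simp [List.takeWhile, Bool.eq_false_iff.mpr hy] at hx

theorem pvDropWhile_head (p : Int → Bool) : ∀ (l : List Int), ∀ y ∈ (l.dropWhile p).head?, p y = false := by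
  intro l
  induction l with
  | nil => simp
  | cons z zs ih =>
    by_cases hz : p z = true
    · intro y hy; exact ih y (by simpa [List.dropWhile, hz] using hy)
    · intro y hy
      simp [List.dropWhile, Bool.eq_false_iff.mpr hz] at hy
      subst hy; exact Bool.eq_false_iff.mpr hz

-- zero-padded sum of absolute consecutive differences, prev-carrying form
def pvGo : Int → List Int → Int
  | p, [] => |p|
  | p, x :: xs => |x - p| + pvGo x xs

theorem pvGo_nonneg : ∀ (l : List Int) (p : Int), 0 ≤ pvGo p l := by
  intro l
  induction l with
  | nil => intro p; simp only [pvGo]; positivity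
  | cons x xs ih =>
    intro p
    have h1 := ih x
    have h2 : (0:Int) ≤ |x - p| := abs_nonneg _
    simp only [pvGo]
    omega

theorem pvFold_go : ∀ (zs : List (Int × Int)) (t p : Int),
    (zs.foldl (fun (s : Int × Int) ab => (s.1 + |ab.1 - ab.2 - s.2|, ab.1 - ab.2)) (t, p)).1 +
      |(zs.foldl (fun (s : Int × Int) ab => (s.1 + |ab.1 - ab.2 - s.2|, ab.1 - ab.2)) (t, p)).2| =
    t + pvGo p (zs.map (fun ab => ab.1 - ab.2)) := by
  intro zs
  induction zs with
  | nil => intro t p; simp [pvGo]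
  | cons ab zs ih =>
    intro t p
    simp only [List.foldl_cons, List.map_cons, pvGo]
    rw [ih]
    ring

theorem pvZipMap : ∀ (a b : List Int),
    (List.zip a b).map (fun ab => ab.1 - ab.2) = List.zipWith (· - ·) a b := by
  intro a
  induction a with
  | nil => intro b; simp
  | cons x xs ih =>
    intro b
    cases b with
    | nil => simp
    | cons y ys => simp [List.zip_cons_cons, ih]

theorem pvAlt_go (node1 node2 : List Int) :
    distcalc_original_alt node1 node2 =
      PySem.Int.floordiv (pvGo 0 (List.zipWith (· - ·) node1 node2)) 2 := by
  unfold distcalc_original_alt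
  have h := pvFold_go (List.zip node1 node2) 0 0
  rw [pvZipMap] at h
  rw [h]
  norm_num

theorem pvFloordiv_double (k : Int) : PySem.Int.floordiv (2 * k) 2 = k := by
  rw [PySem.Int.floordiv_eq_ediv_of_pos (by norm_num)]
  exact Int.mul_ediv_cancel_left k (by norm_num)

-- shifting a positive prefix and the carried prev down by one drops the diff-sum by exactly 1
theorem pvGo_shift_pos : ∀ (t d : List Int) (p : Int), 0 < p → (∀ x ∈ t, 0 < x) →
    (∀ y ∈ d.head?, y ≤ 0) → pvGo (p - 1) (t.map (· + (-1)) ++ d) = pvGo p (t ++ d) - 1 := by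
  intro t
  induction t with
  | nil =>
    intro d p hp _ hd
    cases d with
    | nil =>
      simp only [List.map_nil, List.nil_append, pvGo]
      rw [abs_of_nonneg (by omega), abs_of_nonneg (by omega)]
    | cons y ys =>
      have hy : y ≤ 0 := hd y (by simp)
      simp only [List.map_nil, List.nil_append, pvGo]
      rw [abs_of_nonpos (by omega), abs_of_nonpos (by omega)]
      ring
  | cons x xs ih =>
    intro d p hp ht hd
    have hx : 0 < x := ht x (by simp)
    have := ih d x hx (fun y hy => ht y (by simp [hy])) hd
    simp only [List.map_cons, List.cons_append, pvGo]
    rw [show x + (-1) - (p - 1) = x - p from by ring, show x + (-1) = x - 1 from by ring, this]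
    ring

theorem pvGo_shift_neg : ∀ (t d : List Int) (p : Int), p < 0 → (∀ x ∈ t, x < 0) →
    (∀ y ∈ d.head?, 0 ≤ y) → pvGo (p + 1) (t.map (· + 1) ++ d) = pvGo p (t ++ d) - 1 := by
  intro t
  induction t with
  | nil =>
    intro d p hp _ hd
    cases d with
    | nil =>
      simp only [List.map_nil, List.nil_append, pvGo]
      rw [abs_of_nonpos (by omega), abs_of_nonpos (by omega)]
      ring
    | cons y ys =>
      have hy : 0 ≤ y := hd y (by simp)
      simp only [List.map_nil, List.nil_append, pvGo]
      rw [abs_of_nonneg (by omega), abs_of_nonneg (by omega)]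
      ring
  | cons x xs ih =>
    intro d p hp ht hd
    have hx : x < 0 := ht x (by simp)
    have := ih d x hx (fun y hy => ht y (by simp [hy])) hd
    simp only [List.map_cons, List.cons_append, pvGo]
    rw [show x + 1 - (p + 1) = x - p from by ring, this]
    ring

-- dropping a positive (negative) head run and the prev-0 entry drops pvGo 0 by exactly 2
theorem pvGo_step_pos (x : Int) (xs : List Int) (hx : 0 < x)
    (ht : ∀ y ∈ (x :: xs).takeWhile (fun a => decide (a > 0)), 0 < y)
    (hd : ∀ y ∈ ((x :: xs).dropWhile (fun a => decide (a > 0))).head?, y ≤ 0) :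
    pvGo 0 (((x :: xs).takeWhile (fun a => decide (a > 0))).map (· + (-1)) ++
        (x :: xs).dropWhile (fun a => decide (a > 0))) = pvGo 0 (x :: xs) - 2 := by
  set p := (fun a : Int => decide (a > 0)) with hp
  have hpx : p x = true := by simpa [hp] using hx
  have htw : (x :: xs).takeWhile p = x :: xs.takeWhile p := by simp [List.takeWhile, hpx]
  have hdw : (x :: xs).dropWhile p = xs.dropWhile p := by simp [List.dropWhile, hpx]
  rw [htw, hdw]
  simp only [List.map_cons, List.cons_append, pvGo]
  have hshift := pvGo_shift_pos (xs.takeWhile p) (xs.dropWhile p) x hx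
    (fun y hy => ht y (by rw [htw]; exact List.mem_cons_of_mem _ hy))
    (fun y hy => hd y (by rw [hdw]; exact hy))
  have hxs : xs = xs.takeWhile p ++ xs.dropWhile p := (List.takeWhile_append_dropWhile).symm
  rw [show x + (-1) - 0 = x - 1 from by ring, show x + (-1) = x - 1 from by ring, hshift]
  conv_rhs => rw [hxs]
  rw [abs_of_nonneg (show (0:Int) ≤ x - 1 from by omega),
    abs_of_nonneg (show (0:Int) ≤ x - 0 from by omega)]
  ring

theorem pvGo_step_neg (x : Int) (xs : List Int) (hx : x < 0)
    (ht : ∀ y ∈ (x :: xs).takeWhile (fun a => decide (a < 0)), y < 0)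
    (hd : ∀ y ∈ ((x :: xs).dropWhile (fun a => decide (a < 0))).head?, 0 ≤ y) :
    pvGo 0 (((x :: xs).takeWhile (fun a => decide (a < 0))).map (· + 1) ++
        (x :: xs).dropWhile (fun a => decide (a < 0))) = pvGo 0 (x :: xs) - 2 := by
  set p := (fun a : Int => decide (a < 0)) with hp
  have hpx : p x = true := by simpa [hp] using hx
  have htw : (x :: xs).takeWhile p = x :: xs.takeWhile p := by simp [List.takeWhile, hpx]
  have hdw : (x :: xs).dropWhile p = xs.dropWhile p := by simp [List.dropWhile, hpx]
  rw [htw, hdw]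
  simp only [List.map_cons, List.cons_append, pvGo]
  have hshift := pvGo_shift_neg (xs.takeWhile p) (xs.dropWhile p) x hx
    (fun y hy => ht y (by rw [htw]; exact List.mem_cons_of_mem _ hy))
    (fun y hy => hd y (by rw [hdw]; exact hy))
  have hxs : xs = xs.takeWhile p ++ xs.dropWhile p := (List.takeWhile_append_dropWhile).symm
  rw [show x + 1 - 0 = x + 1 from by ring, hshift]
  conv_rhs => rw [hxs]
  rw [abs_of_nonpos (show x + 1 ≤ (0:Int) from by omega),
    abs_of_nonpos (show x - 0 ≤ (0:Int) from by omega)]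
  ring

theorem pvLoop_go : ∀ (fuel : Nat) (l : List Int) (d : Int), pvMeasure l ≤ fuel →
    2 * pvLoop fuel l d = 2 * d + pvGo 0 l := by
  intro fuel
  induction fuel with
  | zero =>
    intro l d h
    cases l with
    | nil => simp [pvLoop, pvGo]
    | cons x xs => exfalso; simp [pvMeasure] at h
  | succ fuel ih =>
    intro l d h
    cases l with
    | nil => simp [pvLoop, pvGo]
    | cons x xs =>
      by_cases hx0 : x = 0
      · subst hx0
        rw [pvLoop, if_pos rfl, ih xs d (by simp only [pvMeasure, List.map_cons,
          List.sum_cons, List.length_cons] at h ⊢; omega)]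
        simp [pvGo]
      · by_cases hxp : x > 0
        · rw [pvLoop, if_neg hx0, if_pos hxp]
          set p := (fun a : Int => decide (a > 0)) with hp
          have hpx : p x = true := by simpa [hp] using hxp
          have hk := pvFindK_spec p xs x 0 0 hpx
          have hlen : pvFindK (x :: xs) 0 0 p + 1 = ((x :: xs).takeWhile p).length := by omega
          rw [hlen, pvSubFirst_tw]
          have hsplit : (x :: xs) = (x :: xs).takeWhile p ++ (x :: xs).dropWhile p :=
            (List.takeWhile_append_dropWhile).symm
          have hmlt : pvMeasure (((x :: xs).takeWhile p).map (· + (-1)) ++ (x :: xs).dropWhile p)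
              < pvMeasure (x :: xs) := by
            conv_rhs => rw [hsplit]
            apply pvMeasure_shift
            · simp [List.takeWhile, hpx]
            · intro y hy
              have hpy := pvTakeWhile_pos p _ y hy
              simp only [hp, decide_eq_true_eq] at hpy
              omega
          rw [ih _ (d + 1) (by omega)]
          rw [pvGo_step_pos x xs hxp
            (fun y hy => by have := pvTakeWhile_pos p _ y hy; simpa [hp] using this)
            (fun y hy => by have := pvDropWhile_head p _ y hy
                            simp only [hp, decide_eq_false_iff_not] at this
                            omega)]
          ring
        · rw [pvLoop, if_neg hx0, if_neg hxp]
          have hxn : x < 0 := by omega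
          set p := (fun a : Int => decide (a < 0)) with hp
          have hpx : p x = true := by simpa [hp] using hxn
          have hk := pvFindK_spec p xs x 0 0 hpx
          have hlen : pvFindK (x :: xs) 0 0 p + 1 = ((x :: xs).takeWhile p).length := by omega
          rw [hlen, pvSubFirst_tw]
          have hsplit : (x :: xs) = (x :: xs).takeWhile p ++ (x :: xs).dropWhile p :=
            (List.takeWhile_append_dropWhile).symm
          have hmlt : pvMeasure (((x :: xs).takeWhile p).map (· + 1) ++ (x :: xs).dropWhile p)
              < pvMeasure (x :: xs) := by
            conv_rhs => rw [hsplit]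
            apply pvMeasure_shift
            · simp [List.takeWhile, hpx]
            · intro y hy
              have hpy := pvTakeWhile_pos p _ y hy
              simp only [hp, decide_eq_true_eq] at hpy
              omega
          rw [ih _ (d + 1) (by omega)]
          rw [pvGo_step_neg x xs hxn
            (fun y hy => by have := pvTakeWhile_pos p _ y hy; simpa [hp] using this)
            (fun y hy => by have := pvDropWhile_head p _ y hy
                            simp only [hp, decide_eq_false_iff_not] at this
                            omega)]
          ring

theorem pvLoop_closed (l : List Int) : |pvLoop (pvMeasure l) l 0| = PySem.Int.floordiv (pvGo 0 l) 2 := by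
  have h := pvLoop_go (pvMeasure l) l 0 (le_refl _)
  have hnn : 0 ≤ pvLoop (pvMeasure l) l 0 := by have := pvGo_nonneg l 0; omega
  rw [abs_of_nonneg hnn, show pvGo 0 l = 2 * pvLoop (pvMeasure l) l 0 from by omega,
    pvFloordiv_double]

-- ===== VERDICT (by name: the statement is the Claim_ definition above) =====
theorem distcalc_original_spec : Claim_equal_distcalc_original := by
  unfold Claim_equal_distcalc_original
  intro node1 node2 _ hpre
  unfold Spec_distcalc_original Pre_distcalc_original at *
  rw [pvAlt_go]
  unfold distcalc_original
  by_cases h1 : node1.length = 1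
  · rw [if_pos h1]
    match node1, node2, h1, hpre with
    | [a], [b], _, _ =>
      simp only [List.zipWith, List.headD]
      simp only [pvGo, sub_zero]
      rw [show |a - b| + |a - b| = 2 * |a - b| from by ring, pvFloordiv_double]
  · rw [if_neg h1]
    exact pvLoop_closed _
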